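-- pv_equiv track=rewrite | github.com/Ishikaaa/Sabudh-Foundations | 100 Days Code/Day_021.py | max_col
-- ===== SOURCE A (Python) =====
-- def max_col(test_list):
--     res=[]
--     len_test_list=len(test_list)
--     for i in test_list:
--         if len(res)<len(i):
--             res=res+[-1]*(len(i)-len(res))
--         for j in range(len(i)):
--             if res[j]<i[j]:
--                 res[j]=i[j]
--     return res
-- ===== SOURCE B (Python) =====
-- def max_col(test_list):
--     lens = [len(r) for r in test_list]
--     max_len = max(lens) if lens else 0
--     return [max([-1] + [r[j] for r in test_list if len(r) > j]) for j in range(max_len)]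
-- ===== Notes on version B (the rewrite author's own statement) =====
-- stated objective: simpler
-- what changed: Column-major: each output column j is gathered independently as max of -1 and the j-th entries of all long-enough rows, instead of A's row-major in-place pad-and-update accumulator.
import Mathlib
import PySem

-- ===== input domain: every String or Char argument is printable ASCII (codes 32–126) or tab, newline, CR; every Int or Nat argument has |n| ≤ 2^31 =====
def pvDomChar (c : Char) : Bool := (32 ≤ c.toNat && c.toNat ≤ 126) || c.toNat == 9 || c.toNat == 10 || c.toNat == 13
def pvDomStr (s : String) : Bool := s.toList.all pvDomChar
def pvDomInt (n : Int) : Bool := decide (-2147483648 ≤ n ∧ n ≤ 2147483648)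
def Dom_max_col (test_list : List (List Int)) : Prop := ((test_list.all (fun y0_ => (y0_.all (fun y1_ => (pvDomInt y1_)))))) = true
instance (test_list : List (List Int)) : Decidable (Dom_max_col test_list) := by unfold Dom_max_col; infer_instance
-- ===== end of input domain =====

-- B computes the column-wise maxima column-major (one nested pass per column with the -1
-- floor prepended) instead of A's row-major in-place pad-and-update accumulator; objective: simpler.

-- ===== PORT A =====
-- loop body of A's 'for i in test_list' (pad res with -1, then update res[j] in place)
def stepA (res i : List Int) : List Int :=
  let res1 := if res.length < i.length then
      res ++ PySem.List.pyRepeat [(-1 : Int)] ((i.length : Int) - (res.length : Int))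
    else res
  (PySem.List.pyRange 0 (i.length : Int) 1).foldl (fun r j =>
    if PySem.List.pyGetD r j 0 < PySem.List.pyGetD i j 0 then
      PySem.List.pySetD r j (PySem.List.pyGetD i j 0)
    else r) res1

def max_col (test_list : List (List Int)) : List Int :=
  test_list.foldl stepA []

-- ===== PORT B =====
def max_col_alt (test_list : List (List Int)) : List Int :=
  let lens := test_list.map (fun r => (r.length : Int))
  let max_len : Int := if lens = [] then 0 else (PySem.List.max? lens (fun x => x)).getD 0
  (PySem.List.pyRange 0 max_len 1).map (fun j =>
    (PySem.List.max? ((-1 : Int) ::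
        (test_list.filter (fun r => decide (j < (r.length : Int)))).map
          (fun r => PySem.List.pyGetD r j 0))
      (fun x => x)).getD 0)

-- ===== PRECONDITION & SPEC =====
def Spec_max_col (test_list : List (List Int)) (out : List Int) : Prop := out = max_col_alt test_list
instance (test_list : List (List Int)) (out : List Int) : Decidable (Spec_max_col test_list out) := by unfold Spec_max_col; infer_instance

-- ===== CLAIM (what is proved, stated in full; the proofs are below) =====
def Claim_equal_max_col : Prop := ∀ (test_list : List (List Int)), Dom_max_col test_list → Spec_max_col test_list (max_col test_list)

-- ===== LEMMAS AND PROOFS =====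

-- the inner update loop preserves the length of the accumulator
lemma foldl_upd_length (i : List Int) (L : List Int) (pad : List Int) :
    (L.foldl (fun r j =>
      if PySem.List.pyGetD r j 0 < PySem.List.pyGetD i j 0 then
        PySem.List.pySetD r j (PySem.List.pyGetD i j 0)
      else r) pad).length = pad.length := by
  induction L generalizing pad with
  | nil => rfl
  | cons a L ih =>
    rw [List.foldl_cons, ih]
    split_ifs <;> simp [PySem.List.length_pySetD]

lemma inner_getD (i pad : List Int) (hlen : i.length ≤ pad.length) :
    ∀ (k : Nat), k ≤ i.length → ∀ (j : Nat),
    ((PySem.List.pyRange 0 (k : Int) 1).foldl (fun r j =>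
      if PySem.List.pyGetD r j 0 < PySem.List.pyGetD i j 0 then
        PySem.List.pySetD r j (PySem.List.pyGetD i j 0)
      else r) pad).getD j (-1)
    = if j < k then max (pad.getD j (-1)) (i.getD j (-1)) else pad.getD j (-1) := by
  intro k
  induction k with
  | zero =>
    intro _ j
    simp [PySem.List.pyRange_one_eq_nil]
  | succ k ih =>
    intro hk j
    have hk' : k ≤ i.length := Nat.le_of_succ_le hk
    have hkI : ((k + 1 : Nat) : Int) = (k : Int) + 1 := by push_cast; ring
    rw [hkI, PySem.List.pyRange_one_succ_right (by positivity), List.foldl_append]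
    set F : List Int → Int → List Int := fun r j =>
      if PySem.List.pyGetD r j 0 < PySem.List.pyGetD i j 0 then
        PySem.List.pySetD r j (PySem.List.pyGetD i j 0)
      else r with hF
    set S := (PySem.List.pyRange 0 (k : Int) 1).foldl F pad with hS
    have hSlen : S.length = pad.length := foldl_upd_length i _ pad
    have hkS : k < S.length := by omega
    have hSk : S.getD k 0 = S.getD k (-1) := by
      rw [List.getD_eq_getElem _ _ hkS, List.getD_eq_getElem _ _ hkS]
    have hSk2 : S.getD k (-1) = pad.getD k (-1) := by
      rw [ih hk' k]; simp
    have hik : i.getD k 0 = i.getD k (-1) := by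
      rw [List.getD_eq_getElem _ _ (by omega), List.getD_eq_getElem _ _ (by omega)]
    simp only [List.foldl_cons, List.foldl_nil, hF]
    simp only [PySem.List.pyGetD_natCast]
    by_cases hc : S.getD k 0 < i.getD k 0
    · rw [if_pos hc]
      have : PySem.List.pySetD S (k : Int) (i.getD k 0) = S.set k (i.getD k 0) := by
        simp
      rw [this]
      by_cases hjk : j = k
      · subst hjk
        rw [List.getD_eq_getElem _ _ (by simpa using hkS), List.getElem_set_self]
        rw [if_pos (by omega)]
        rw [hik, ← hSk2, ← hSk]
        omega
      · rcases lt_or_ge j S.length with hjS | hjS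
        · rw [List.getD_eq_getElem _ _ (by simpa using hjS),
            List.getElem_set_ne (by omega), ← List.getD_eq_getElem _ (-1) hjS, ih hk' j]
          have : j < k + 1 ↔ j < k := by omega
          simp [this]
        · have hp : pad.getD j (-1) = -1 := by
            rw [List.getD_eq_getElem?_getD, List.getElem?_eq_none (by omega : pad.length ≤ j)]
            rfl
          have h1 : ∀ v : Int, (S.set k v).getD j (-1) = -1 := by
            intro v
            rw [List.getD_eq_getElem?_getD,
              List.getElem?_eq_none (by simpa using hjS : (S.set k v).length ≤ j)]
            rfl
          rw [h1, if_neg (by omega), hp]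
    · rw [if_neg hc]
      rw [ih hk' j]
      by_cases hjk : j = k
      · subst hjk
        rw [if_neg (by omega), if_pos (by omega)]
        rw [hSk, hSk2, hik] at hc
        omega
      · have : (j < k + 1) ↔ j < k := by omega
        simp [this]

lemma pad_getD (res : List Int) (m : Nat) (j : Nat) :
    (res ++ List.replicate m (-1 : Int)).getD j (-1) = res.getD j (-1) := by
  rcases lt_or_ge j res.length with h | h
  · rw [List.getD_eq_getElem _ _ (by simp; omega), List.getD_eq_getElem _ _ h,
      List.getElem_append_left h]
  · rcases lt_or_ge j (res.length + m) with h2 | h2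
    · rw [List.getD_eq_getElem _ _ (by simp; omega)]
      rw [List.getElem_append_right h]
      simp [List.getD_eq_getElem?_getD, List.getElem?_eq_none (by omega : res.length ≤ j)]
    · simp [List.getD_eq_getElem?_getD, List.getElem?_eq_none (by omega : res.length ≤ j),
        List.getElem?_eq_none (show (res ++ List.replicate m (-1:Int)).length ≤ j by simp; omega)]

lemma repeat_eq (res i : List Int) (h : res.length < i.length) :
    res ++ PySem.List.pyRepeat [(-1 : Int)] ((i.length : Int) - (res.length : Int))
      = res ++ List.replicate (i.length - res.length) (-1 : Int) := by
  rw [PySem.List.pyRepeat_singleton]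
  congr 1
  congr 1
  omega

lemma step_length (res i : List Int) : (stepA res i).length = max res.length i.length := by
  unfold stepA
  rw [foldl_upd_length]
  split_ifs with h
  · rw [repeat_eq res i h]
    simp
    omega
  · simp at h
    omega

lemma step_getD (res i : List Int) (hQ : ∀ j : Nat, -1 ≤ res.getD j (-1)) (j : Nat) :
    (stepA res i).getD j (-1) = max (res.getD j (-1)) (i.getD j (-1)) := by
  unfold stepA
  set pad := if res.length < i.length then
      res ++ PySem.List.pyRepeat [(-1 : Int)] ((i.length : Int) - (res.length : Int))
    else res with hpad
  have hpadlen : i.length ≤ pad.length := by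
    rw [hpad]
    split_ifs with h
    · rw [repeat_eq res i h]
      simp
      omega
    · simp at h
      omega
  have hpadget : ∀ j' : Nat, pad.getD j' (-1) = res.getD j' (-1) := by
    intro j'
    rw [hpad]
    split_ifs with h
    · rw [repeat_eq res i h, pad_getD]
    · rfl
  rw [inner_getD i pad hpadlen i.length le_rfl j]
  by_cases hj : j < i.length
  · rw [if_pos hj, hpadget]
  · rw [if_neg hj, hpadget]
    have : i.getD j (-1) = -1 := by
      rw [List.getD_eq_getElem?_getD, List.getElem?_eq_none (by omega : i.length ≤ j)]
      rfl
    rw [this]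
    have := hQ j
    omega

lemma foldl_stepA (rows : List (List Int)) : ∀ res : List Int,
    (∀ j : Nat, -1 ≤ res.getD j (-1)) →
    ((rows.foldl stepA res).length = rows.foldl (fun m r => max m r.length) res.length
     ∧ ∀ j : Nat, (rows.foldl stepA res).getD j (-1)
        = rows.foldl (fun m r => max m (r.getD j (-1))) (res.getD j (-1))) := by
  induction rows with
  | nil => exact fun res _ => ⟨rfl, fun _ => rfl⟩
  | cons r rows ih =>
    intro res hQ
    have hQ' : ∀ j : Nat, -1 ≤ (stepA res r).getD j (-1) := by
      intro j
      rw [step_getD res r hQ j]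
      exact le_trans (hQ j) (le_max_left _ _)
    obtain ⟨hlen, hget⟩ := ih (stepA res r) hQ'
    refine ⟨?_, ?_⟩
    · simp only [List.foldl_cons]
      rw [hlen, step_length]
    · intro j
      simp only [List.foldl_cons]
      rw [hget j, step_getD res r hQ j]

lemma colsFold (j : Nat) (rows : List (List Int)) : ∀ acc : Int, -1 ≤ acc →
    (((rows.filter (fun r => decide ((j : Int) < (r.length : Int)))).map
        (fun r => PySem.List.pyGetD r (j : Int) 0)).foldl max acc)
    = rows.foldl (fun m r => max m (r.getD j (-1))) acc := by
  induction rows with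
  | nil => intro acc _; rfl
  | cons r rows ih =>
    intro acc hacc
    by_cases h : (j : Int) < (r.length : Int)
    · rw [List.filter_cons_of_pos (by simpa using h), List.map_cons, List.foldl_cons,
        List.foldl_cons]
      have hj : j < r.length := by exact_mod_cast h
      have : PySem.List.pyGetD r (j : Int) 0 = r.getD j (-1) := by
        rw [PySem.List.pyGetD_natCast, List.getD_eq_getElem _ _ hj, List.getD_eq_getElem _ _ hj]
      rw [this]
      exact ih _ (le_trans hacc (le_max_left _ _))
    · rw [List.filter_cons_of_neg (by simpa using h), List.foldl_cons]
      have : r.getD j (-1) = -1 := by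
        rw [List.getD_eq_getElem?_getD, List.getElem?_eq_none (by omega : r.length ≤ j)]
        rfl
      rw [this, max_eq_left hacc]
      exact ih _ hacc

lemma lensFold (rs : List (List Int)) : ∀ a : Nat,
    (rs.map (fun r => (r.length : Int))).foldl max (a : Int)
    = ((rs.foldl (fun m r => max m r.length) a : Nat) : Int) := by
  induction rs with
  | nil => intro a; rfl
  | cons r rs ih =>
    intro a
    rw [List.map_cons, List.foldl_cons, List.foldl_cons]
    rw [show max (a : Int) (r.length : Int) = ((max a r.length : Nat) : Int) by
      push_cast; rfl]
    exact ih _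

lemma maxlen_int (rows : List (List Int)) :
    (if rows.map (fun r => (r.length : Int)) = [] then (0 : Int)
     else (PySem.List.max? (rows.map fun r => (r.length : Int)) (fun x => x)).getD 0)
    = ((rows.foldl (fun m r => max m r.length) 0 : Nat) : Int) := by
  cases rows with
  | nil => rfl
  | cons r rs =>
    rw [if_neg (by simp), List.map_cons, PySem.List.max?_id_cons, Option.getD_some,
      lensFold rs r.length, List.foldl_cons, Nat.zero_max]

-- ===== VERDICT (by name: the statement is the Claim_ definition above) =====
theorem max_col_spec : Claim_equal_max_col := by
  intro rows _
  unfold Spec_max_col max_col max_col_alt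
  obtain ⟨hlenA, hgetA⟩ := foldl_stepA rows []
    (by intro j; rw [List.getD_eq_getElem?_getD]; simp)
  simp only [List.length_nil] at hlenA
  have hgetA' : ∀ j : Nat, (rows.foldl stepA []).getD j (-1)
      = rows.foldl (fun m r => max m (r.getD j (-1))) (-1) := by
    intro j
    rw [hgetA j]
    simp
  dsimp only
  rw [maxlen_int rows]
  set M : Nat := rows.foldl (fun m r => max m r.length) 0 with hM
  rw [PySem.List.pyRange_one]
  simp only [sub_zero, Int.toNat_natCast, zero_add, List.map_map]
  apply List.ext_getElem
  · rw [hlenA]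
    simp
  · intro j h1 h2
    simp only [List.length_map, List.length_range] at h2
    rw [← List.getD_eq_getElem _ (-1) h1, hgetA' j]
    simp only [List.getElem_map, List.getElem_range, Function.comp_apply]
    rw [PySem.List.max?_id_cons, Option.getD_some]
    rw [colsFold j rows (-1) le_rfl]
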